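-- pv_equiv track=rewrite | github.com/RobinRab/SINFBot | src/cmds/games/wordle.py | color_function
-- ===== SOURCE A (Python) =====
-- def color_function(wordle_word:str, guess_word:str) -> str:
--     dico_occurences : dict[str, int] = {}
--     #Dictionnary to check repeated letters
--     for letter in wordle_word:
--         if letter not in dico_occurences.keys():
--             dico_occurences[letter] = 1
--         else:
--             dico_occurences[letter] += 1
--     colors = ""
--     colors_list : list[str] = []
--
--     #Iteration in the words to check the green letters
--     for letter_guess, letter_wordle_word in zip(guess_word, wordle_word):
--         if letter_guess == letter_wordle_word:
--             colors_list.append("🟩")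
--             dico_occurences[letter_guess] -= 1
--         else:
--             colors_list.append("1")
--
--     for letter_guess, letter_wordle_word, color_test in zip(guess_word, wordle_word, colors_list) :
--
--         #if it is "1" (not green) -> check if it is yellow or grey
--         if color_test == "1":
--             index_1 = colors_list.index("1")
--
--             #check the conditions for a letter to be yellow
--             #letter in the words && occurence count check -> yellow
--             if letter_guess in wordle_word and dico_occurences[letter_guess] != 0:
--                 colors_list[index_1]="🟨"
--                 dico_occurences[letter_guess] -= 1
--             else:
--                 colors_list[index_1]="🟥"
--
--     for color in colors_list:
--         colors += color
--
--     return colors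
-- ===== SOURCE B (Python) =====
-- def color_function(wordle_word: str, guess_word: str) -> str:
--     # leftover letter budget: every letter of wordle_word not consumed by a green match
--     remaining = {}
--     gi = iter(guess_word)
--     for w_ch in wordle_word:
--         if next(gi, None) != w_ch:
--             remaining[w_ch] = remaining.get(w_ch, 0) + 1
--     colors = ""
--     for g_ch, w_ch in zip(guess_word, wordle_word):
--         if g_ch == w_ch:
--             colors += "🟩"
--         elif remaining.get(g_ch, 0) > 0:
--             remaining[g_ch] -= 1
--             colors += "🟨"
--         else:
--             colors += "🟥"
--     return colors
-- ===== Notes on version B (the rewrite author's own statement) =====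
-- stated objective: faster
-- what changed: B replaces A's three staged passes with their 'in wordle_word' substring scans, mutated placeholder list and repeated colors_list.index('1') scans by two linear passes: one simultaneous walk of the two words that builds the dict of wordle letters not consumed by green matches, and one pass over the zipped words that emits each tile directly from that dict.
import Mathlib
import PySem

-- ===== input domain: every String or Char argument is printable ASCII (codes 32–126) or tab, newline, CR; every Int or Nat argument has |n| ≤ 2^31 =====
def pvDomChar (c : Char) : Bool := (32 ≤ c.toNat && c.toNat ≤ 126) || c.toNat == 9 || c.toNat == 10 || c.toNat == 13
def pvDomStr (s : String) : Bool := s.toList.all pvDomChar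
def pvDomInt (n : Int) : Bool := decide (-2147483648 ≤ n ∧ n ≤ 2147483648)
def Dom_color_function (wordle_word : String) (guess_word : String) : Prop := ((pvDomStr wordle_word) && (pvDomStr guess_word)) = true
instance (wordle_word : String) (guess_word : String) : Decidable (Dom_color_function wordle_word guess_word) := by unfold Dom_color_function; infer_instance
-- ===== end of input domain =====

-- B replaces A's three staged passes (substring scans, placeholder list mutated via repeated
-- colors_list.index("1") scans) by two linear passes over a leftover-letter-budget dict.


-- ===== PORT A =====
-- first loop: occurrence dictionary over the wordle word
def pvStepCount (d : PySem.Dict Char Int) (letter : Char) : PySem.Dict Char Int :=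
  if letter ∉ PySem.Dict.keys d then PySem.Dict.insert d letter 1
  else PySem.Dict.modify d letter 0 (· + 1)   -- dico[letter] += 1 (key present in this branch)

-- second loop: green pass, appends "🟩"/"1" and decrements the dict on green
def pvStep2 (st : List String × PySem.Dict Char Int) (p : Char × Char) :
    List String × PySem.Dict Char Int :=
  if p.1 = p.2 then (st.1 ++ ["🟩"], PySem.Dict.modify st.2 p.1 0 (· - 1))
  else (st.1 ++ ["1"], st.2)

-- third loop: Python zips the LIVE colors_list, i.e. reads it by index while mutating it in
-- place at colors_list.index("1"); ported exactly as read-by-index over the current state.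
def pvStep3 (wl : List Char) (st : List String × PySem.Dict Char Int)
    (e : Int × (Char × Char)) : List String × PySem.Dict Char Int :=
  match PySem.List.pyGet? st.1 e.1 with
  | none => st   -- unreachable: the index is in range
  | some ct =>
    if ct = "1" then
      match PySem.List.index? st.1 "1" with
      | none => st   -- unreachable: ct = "1" is in the list
      | some j =>
        -- 'letter_guess in wordle_word' is a one-char substring test = char membership
        if PySem.Chars.isIn [e.2.1] wl = true ∧ PySem.Dict.getD st.2 e.2.1 0 ≠ 0 then
          (st.1.set j "🟨", PySem.Dict.modify st.2 e.2.1 0 (· - 1))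
        else
          (st.1.set j "🟥", st.2)
    else st

def color_function (wordle_word : String) (guess_word : String) : String :=
  let wl := wordle_word.toList
  let gl := guess_word.toList
  let dico0 := wl.foldl pvStepCount PySem.Dict.empty
  let st1 := (gl.zip wl).foldl pvStep2 ([], dico0)
  let st2 := (PySem.List.enumerate (gl.zip wl) 0).foldl (pvStep3 wl) st1
  st2.1.foldl (fun colors color => colors ++ color) ""

-- ===== PORT B =====
-- pass 1 of Source B: walk wordle_word with the guess iterator ('next(gi, None)') as residual list
def pvStepRem (st : PySem.Dict Char Int × List Char) (wc : Char) :
    PySem.Dict Char Int × List Char :=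
  match st.2 with
  | [] => (PySem.Dict.insert st.1 wc (PySem.Dict.getD st.1 wc 0 + 1), [])
  | gc :: rest =>
    (if gc ≠ wc then PySem.Dict.insert st.1 wc (PySem.Dict.getD st.1 wc 0 + 1) else st.1, rest)

-- pass 2 of Source B: emit one tile per zipped pair, spending the budget on yellows
def pvStepB (st : String × PySem.Dict Char Int) (p : Char × Char) :
    String × PySem.Dict Char Int :=
  if p.1 = p.2 then (st.1 ++ "🟩", st.2)
  else if 0 < PySem.Dict.getD st.2 p.1 0 then
    (st.1 ++ "🟨", PySem.Dict.modify st.2 p.1 0 (· - 1))   -- remaining[gc] -= 1 (key present)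
  else (st.1 ++ "🟥", st.2)

def color_function_alt (wordle_word : String) (guess_word : String) : String :=
  let remaining := (wordle_word.toList.foldl pvStepRem (PySem.Dict.empty, guess_word.toList)).1
  ((guess_word.toList.zip wordle_word.toList).foldl pvStepB ("", remaining)).1

-- ===== PRECONDITION & SPEC =====
def Spec_color_function (wordle_word : String) (guess_word : String) (out : String) : Prop := out = color_function_alt wordle_word guess_word
instance (wordle_word : String) (guess_word : String) (out : String) : Decidable (Spec_color_function wordle_word guess_word out) := by unfold Spec_color_function; infer_instance

-- ===== CLAIM (what is proved, stated in full; the proofs are below) =====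
def Claim_equal_color_function : Prop := ∀ (wordle_word : String) (guess_word : String), Dom_color_function wordle_word guess_word → Spec_color_function wordle_word guess_word (color_function wordle_word guess_word)

-- ===== LEMMAS AND PROOFS =====

-- A's third loop, rephrased as a structural recursion (proof device only)
def pvEmitA (wl : List Char) : List (Char × Char) → PySem.Dict Char Int →
    List String × PySem.Dict Char Int
  | [], d => ([], d)
  | p :: zs, d =>
    if p.1 = p.2 then
      let r := pvEmitA wl zs d; ("🟩" :: r.1, r.2)
    else if PySem.Chars.isIn [p.1] wl = true ∧ PySem.Dict.getD d p.1 0 ≠ 0 then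
      let r := pvEmitA wl zs (PySem.Dict.modify d p.1 0 (· - 1)); ("🟨" :: r.1, r.2)
    else
      let r := pvEmitA wl zs d; ("🟥" :: r.1, r.2)

-- B's second pass, as a structural recursion (proof device only)
def pvEmitB : List (Char × Char) → PySem.Dict Char Int → List String × PySem.Dict Char Int
  | [], d => ([], d)
  | p :: zs, d =>
    if p.1 = p.2 then
      let r := pvEmitB zs d; ("🟩" :: r.1, r.2)
    else if 0 < PySem.Dict.getD d p.1 0 then
      let r := pvEmitB zs (PySem.Dict.modify d p.1 0 (· - 1)); ("🟨" :: r.1, r.2)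
    else
      let r := pvEmitB zs d; ("🟥" :: r.1, r.2)

def pvTile (p : Char × Char) : String := if p.1 = p.2 then "🟩" else "1"

def pvGreens (c : Char) (zs : List (Char × Char)) : Nat :=
  zs.countP (fun p => p.1 == p.2 && p.2 == c)

lemma pv_count (wl : List Char) : ∀ (d : PySem.Dict Char Int) (c : Char),
    PySem.Dict.getD (wl.foldl pvStepCount d) c 0 = PySem.Dict.getD d c 0 + (wl.count c : Int) := by
  induction wl with
  | nil => intro d c; simp
  | cons a t ih =>
    intro d c
    simp only [List.foldl_cons, ih, List.count_cons]
    by_cases hk : a ∈ PySem.Dict.keys d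
    · by_cases hc : c = a
      · simp [pvStepCount, hk, hc]; omega
      · simp [pvStepCount, hk, PySem.Dict.getD_modify, hc]
        exact fun h => hc h.symm
    · have h0 : PySem.Dict.getD d a 0 = 0 := by
        apply PySem.Dict.getD_of_not_contains
        rw [← Bool.not_eq_true, PySem.Dict.contains_iff_mem_keys]
        exact hk
      by_cases hc : c = a
      · simp [pvStepCount, hk, hc, h0]; omega
      · simp [pvStepCount, hk, PySem.Dict.getD_insert, hc]
        exact fun h => hc h.symm

lemma pv_pass2_colors (zs : List (Char × Char)) : ∀ (acc : List String)
    (d : PySem.Dict Char Int),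
    (zs.foldl pvStep2 (acc, d)).1 = acc ++ zs.map pvTile := by
  induction zs with
  | nil => intro acc d; simp
  | cons p t ih =>
    intro acc d
    by_cases hp : p.1 = p.2 <;> simp [pvStep2, pvTile, hp, ih]

lemma pv_pass2_dict (zs : List (Char × Char)) : ∀ (acc : List String)
    (d : PySem.Dict Char Int) (c : Char),
    PySem.Dict.getD (zs.foldl pvStep2 (acc, d)).2 c 0
      = PySem.Dict.getD d c 0 - (pvGreens c zs : Int) := by
  induction zs with
  | nil => intro acc d c; simp [pvGreens]
  | cons p t ih =>
    intro acc d c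
    obtain ⟨a, b⟩ := p
    by_cases hp : a = b
    · subst hp
      rw [List.foldl_cons]
      simp only [pvStep2, if_pos rfl]
      rw [ih]
      by_cases hc : c = a
      · subst hc
        simp [pvGreens, List.countP_cons, PySem.Dict.getD_modify]
        push_cast; omega
      · simp [pvGreens, List.countP_cons, PySem.Dict.getD_modify, hc, Ne.symm hc]
    · rw [List.foldl_cons]
      simp only [pvStep2, if_neg hp]
      rw [ih]
      simp [pvGreens, List.countP_cons, hp]

lemma pv_isIn_singleton (c : Char) (l : List Char) (h : c ∈ l) :
    PySem.Chars.isIn [c] l = true := by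
  rw [PySem.Chars.isIn_iff_infix]
  obtain ⟨s, t, rfl⟩ := List.append_of_mem h
  exact ⟨s, t, by simp⟩

lemma pv_pass3 (wl : List Char) : ∀ (zs : List (Char × Char)) (done : List String)
    (d : PySem.Dict Char Int), "1" ∉ done →
    (PySem.List.enumerate zs (done.length : Int)).foldl (pvStep3 wl) (done ++ zs.map pvTile, d)
      = (done ++ (pvEmitA wl zs d).1, (pvEmitA wl zs d).2) := by
  intro zs
  induction zs with
  | nil => intro done d h1; simp [pvEmitA]
  | cons p t ih =>
    intro done d h1
    rw [PySem.List.enumerate_cons, List.foldl_cons]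
    have hget : PySem.List.pyGet? (done ++ (p :: t).map pvTile) ((done.length : Nat) : Int)
        = some (pvTile p) := by
      rw [PySem.List.pyGet?_natCast]
      simp [List.getElem?_append_right]
    by_cases hp : p.1 = p.2
    · have htile : pvTile p = "🟩" := by simp [pvTile, hp]
      have hstep : pvStep3 wl (done ++ (p :: t).map pvTile, d) (((done.length : Nat) : Int), p)
          = (done ++ (p :: t).map pvTile, d) := by
        simp [pvStep3, hget, htile]
      rw [hstep]
      have hre : done ++ (p :: t).map pvTile = (done ++ ["🟩"]) ++ t.map pvTile := by
        simp [htile]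
      have ih' := ih (done ++ ["🟩"]) d (by simp [h1])
      rw [show (((done ++ ["🟩"]).length : Nat) : Int) = (done.length : Int) + 1 by simp] at ih'
      rw [hre, ih']
      simp [pvEmitA, hp]
    · have htile : pvTile p = "1" := by simp [pvTile, hp]
      have hcons : List.map pvTile (p :: t) = "1" :: List.map pvTile t := by simp [htile]
      rw [hcons] at hget ⊢
      have hsplit : done ++ "1" :: List.map pvTile t = (done ++ ["1"]) ++ List.map pvTile t := by
        simp
      have hidx : PySem.List.index? (done ++ "1" :: List.map pvTile t) "1" = some done.length := by
        rw [hsplit, PySem.List.index?_append_of_mem _ (by simp),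
          PySem.List.index?_append_singleton_self _ _ h1]
      have hset : ∀ x : String,
          (done ++ "1" :: List.map pvTile t).set done.length x
            = (done ++ [x]) ++ List.map pvTile t := by
        intro x
        rw [hsplit, List.append_assoc, List.set_append_right _ _ (le_refl _)]
        simp
      have hlen : ∀ x : String, (((done ++ [x]).length : Nat) : Int) = (done.length : Int) + 1 := by
        intro x; simp
      by_cases hC : PySem.Chars.isIn [p.1] wl = true ∧ PySem.Dict.getD d p.1 0 ≠ 0
      · have hstep : pvStep3 wl (done ++ "1" :: List.map pvTile t, d)
            (((done.length : Nat) : Int), p)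
            = ((done ++ ["🟨"]) ++ List.map pvTile t, PySem.Dict.modify d p.1 0 (· - 1)) := by
          unfold pvStep3
          rw [hget, htile]
          simp only [if_pos rfl]
          rw [hidx]
          simp only [if_pos hC, hset]
          simp
        have ih' := ih (done ++ ["🟨"]) (PySem.Dict.modify d p.1 0 (· - 1)) (by simp [h1])
        rw [hlen "🟨"] at ih'
        rw [hstep, ih']
        simp [pvEmitA, hp, hC]
      · have hstep : pvStep3 wl (done ++ "1" :: List.map pvTile t, d)
            (((done.length : Nat) : Int), p)
            = ((done ++ ["🟥"]) ++ List.map pvTile t, d) := by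
          unfold pvStep3
          rw [hget, htile]
          simp only [if_pos rfl]
          rw [hidx]
          simp only [if_neg hC, hset]
          simp
        have ih' := ih (done ++ ["🟥"]) d (by simp [h1])
        rw [hlen "🟥"] at ih'
        rw [hstep, ih']
        simp [pvEmitA, hp, hC]

lemma pv_rem_getD (wl : List Char) : ∀ (gl : List Char) (d : PySem.Dict Char Int) (c : Char),
    PySem.Dict.getD (wl.foldl pvStepRem (d, gl)).1 c 0
      = PySem.Dict.getD d c 0 + (wl.count c : Int) - (pvGreens c (gl.zip wl) : Int) := by
  induction wl with
  | nil => intro gl d c; simp [pvGreens]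
  | cons wc t ih =>
    intro gl d c
    cases gl with
    | nil =>
      rw [List.foldl_cons]
      simp only [pvStepRem]
      rw [ih [] _ c]
      by_cases hc : c = wc
      · simp [PySem.Dict.getD_insert, hc, pvGreens, List.count_cons]; omega
      · simp [PySem.Dict.getD_insert, hc, pvGreens, List.count_cons]
        exact fun h => hc h.symm
    | cons gc gt =>
      rw [List.foldl_cons]
      simp only [pvStepRem, List.zip_cons_cons]
      by_cases hg : gc = wc
      · subst hg
        rw [if_neg (by simp), ih gt d c]
        by_cases hc : c = gc
        · subst hc
          simp [pvGreens, List.countP_cons, List.count_cons]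
          push_cast; omega
        · simp [pvGreens, List.countP_cons, List.count_cons, hc, Ne.symm hc]
      · rw [if_pos hg, ih gt _ c]
        by_cases hc : c = wc
        · subst hc
          simp [PySem.Dict.getD_insert, pvGreens, List.countP_cons, List.count_cons, hg]
          push_cast; omega
        · simp [PySem.Dict.getD_insert, pvGreens, List.countP_cons, List.count_cons, hc,
            Ne.symm hc, hg]

lemma pv_rem_nonneg (wl : List Char) : ∀ (gl : List Char) (d : PySem.Dict Char Int),
    (∀ c, 0 ≤ PySem.Dict.getD d c 0) →
    ∀ c, 0 ≤ PySem.Dict.getD (wl.foldl pvStepRem (d, gl)).1 c 0 := by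
  induction wl with
  | nil => intro gl d h c; simpa using h c
  | cons wc t ih =>
    intro gl d h c
    have hins : ∀ c', 0 ≤ PySem.Dict.getD
        (PySem.Dict.insert d wc (PySem.Dict.getD d wc 0 + 1)) c' 0 := by
      intro c'
      by_cases hc : c' = wc <;> simp [PySem.Dict.getD_insert, hc] <;>
        [skip; exact h c'] <;> have := h wc <;> omega
    cases gl with
    | nil =>
      rw [List.foldl_cons]; simp only [pvStepRem]
      exact ih [] _ hins c
    | cons gc gt =>
      rw [List.foldl_cons]; simp only [pvStepRem]
      by_cases hg : gc = wc
      · subst hg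
        rw [if_neg (by simp)]
        exact ih gt d h c
      · rw [if_pos hg]
        exact ih gt _ hins c

lemma pv_rem_support (wl : List Char) : ∀ (gl : List Char) (d : PySem.Dict Char Int) (c : Char),
    PySem.Dict.getD (wl.foldl pvStepRem (d, gl)).1 c 0 ≠ 0 →
    PySem.Dict.getD d c 0 ≠ 0 ∨ c ∈ wl := by
  induction wl with
  | nil => intro gl d c h; left; simpa using h
  | cons wc t ih =>
    intro gl d c h
    have hins : ∀ (d : PySem.Dict Char Int),
        PySem.Dict.getD (PySem.Dict.insert d wc (PySem.Dict.getD d wc 0 + 1)) c 0 ≠ 0 →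
        PySem.Dict.getD d c 0 ≠ 0 ∨ c ∈ wc :: t := by
      intro d hne
      by_cases hc : c = wc
      · right; simp [hc]
      · left; simpa [PySem.Dict.getD_insert, hc] using hne
    cases gl with
    | nil =>
      rw [List.foldl_cons] at h; simp only [pvStepRem] at h
      rcases ih [] _ c h with h' | h'
      · exact hins d h'
      · right; exact List.mem_cons_of_mem _ h'
    | cons gc gt =>
      rw [List.foldl_cons] at h; simp only [pvStepRem] at h
      by_cases hg : gc = wc
      · subst hg
        rw [if_neg (by simp)] at h
        rcases ih gt d c h with h' | h'
        · exact Or.inl h'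
        · right; exact List.mem_cons_of_mem _ h'
      · rw [if_pos hg] at h
        rcases ih gt _ c h with h' | h'
        · exact hins d h'
        · right; exact List.mem_cons_of_mem _ h'

lemma pv_foldB (zs : List (Char × Char)) : ∀ (s : String) (d : PySem.Dict Char Int),
    zs.foldl pvStepB (s, d)
      = ((pvEmitB zs d).1.foldl (fun colors color => colors ++ color) s, (pvEmitB zs d).2) := by
  induction zs with
  | nil => intro s d; simp [pvEmitB]
  | cons p t ih =>
    intro s d
    by_cases hp : p.1 = p.2
    · simp [pvStepB, pvEmitB, hp, ih]
    · by_cases hpos : 0 < PySem.Dict.getD d p.1 0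
      · simp [pvStepB, pvEmitB, hp, hpos, ih]
      · simp [pvStepB, pvEmitB, hp, hpos, ih]

lemma pv_emit_eq (wl : List Char) : ∀ (zs : List (Char × Char))
    (dA dB : PySem.Dict Char Int),
    (∀ c, PySem.Dict.getD dA c 0 = PySem.Dict.getD dB c 0) →
    (∀ c, PySem.Dict.getD dB c 0 ≠ 0 → c ∈ wl) →
    (∀ c, 0 ≤ PySem.Dict.getD dB c 0) →
    (pvEmitA wl zs dA).1 = (pvEmitB zs dB).1 := by
  intro zs
  induction zs with
  | nil => intro dA dB _ _ _; simp [pvEmitA, pvEmitB]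
  | cons p t ih =>
    intro dA dB heq hsup hnn
    by_cases hp : p.1 = p.2
    · simp only [pvEmitA, pvEmitB, hp, if_true]
      simpa using ih dA dB heq hsup hnn
    · have hv := heq p.1
      by_cases hpos : 0 < PySem.Dict.getD dB p.1 0
      · have hmem : p.1 ∈ wl := hsup p.1 (by omega)
        have hCA : PySem.Chars.isIn [p.1] wl = true ∧ PySem.Dict.getD dA p.1 0 ≠ 0 :=
          ⟨pv_isIn_singleton _ _ hmem, by omega⟩
        have heq' : ∀ c, PySem.Dict.getD (PySem.Dict.modify dA p.1 0 (· - 1)) c 0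
            = PySem.Dict.getD (PySem.Dict.modify dB p.1 0 (· - 1)) c 0 := by
          intro c; by_cases hc : c = p.1 <;>
            simp [PySem.Dict.getD_modify, hc, heq c, heq p.1]
        have hsup' : ∀ c, PySem.Dict.getD (PySem.Dict.modify dB p.1 0 (· - 1)) c 0 ≠ 0 →
            c ∈ wl := by
          intro c hne
          by_cases hc : c = p.1
          · rw [hc]; exact hmem
          · exact hsup c (by simpa [PySem.Dict.getD_modify, hc] using hne)
        have hnn' : ∀ c, 0 ≤ PySem.Dict.getD (PySem.Dict.modify dB p.1 0 (· - 1)) c 0 := by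
          intro c
          by_cases hc : c = p.1
          · simp [PySem.Dict.getD_modify, hc]; omega
          · simpa [PySem.Dict.getD_modify, hc] using hnn c
        have hne : PySem.Dict.getD dA p.1 0 ≠ 0 := by omega
        simp [pvEmitA, pvEmitB, hp, hCA.1, hne, hpos]
        exact ih _ _ heq' hsup' hnn'
      · have hz : PySem.Dict.getD dB p.1 0 = 0 := by have := hnn p.1; omega
        have hCA : ¬ (PySem.Chars.isIn [p.1] wl = true ∧ PySem.Dict.getD dA p.1 0 ≠ 0) := by
          rw [hv, hz]; simp
        simp only [pvEmitA, pvEmitB, hp, if_false, if_neg hCA, if_neg hpos]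
        simpa using ih dA dB heq hsup hnn

lemma pv_main (w g : String) : color_function w g = color_function_alt w g := by
  unfold color_function color_function_alt
  simp only []
  set wl := w.toList with hwl
  set gl := g.toList with hgl
  set zs := gl.zip wl with hzs
  set dico0 := wl.foldl pvStepCount PySem.Dict.empty with hd0
  have hpair : zs.foldl pvStep2 ([], dico0)
      = (zs.map pvTile, (zs.foldl pvStep2 ([], dico0)).2) := by
    have h1 := pv_pass2_colors zs [] dico0
    simp at h1
    exact Prod.ext h1 rfl
  set d1 := (zs.foldl pvStep2 ([], dico0)).2 with hd1
  have h3 := pv_pass3 wl zs [] d1 (by simp)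
  simp only [List.length_nil, Nat.cast_zero, List.nil_append] at h3
  rw [hpair, h3]
  have hrem := pv_foldB zs "" (wl.foldl pvStepRem (PySem.Dict.empty, gl)).1
  rw [hrem]
  have hEq : (pvEmitA wl zs d1).1
      = (pvEmitB zs (wl.foldl pvStepRem (PySem.Dict.empty, gl)).1).1 := by
    apply pv_emit_eq
    · intro c
      rw [hd1, pv_pass2_dict zs [] dico0 c, hd0, pv_count wl PySem.Dict.empty c,
        pv_rem_getD wl gl PySem.Dict.empty c]
    · intro c hne
      rcases pv_rem_support wl gl PySem.Dict.empty c hne with h' | h'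
      · simp at h'
      · exact h'
    · exact pv_rem_nonneg wl gl PySem.Dict.empty (by simp)
  rw [hEq]

-- ===== VERDICT (by name: the statement is the Claim_ definition above) =====
theorem color_function_spec : Claim_equal_color_function := by
  unfold Claim_equal_color_function Spec_color_function
  intro w g _
  exact pv_main w g
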